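-- pv_equiv track=rewrite | github.com/chupinana04/Python-PTIT | CodePTIT/PY01059.py | solve
-- ===== SOURCE A (Python) =====
-- def solve(s):
--     tong, tich = 0, 1
--     check = False
--     for i in range(len(s)):
--         if i % 2 == 0:
--             tong += int(s[i])
--         else:
--             if s[i] != '0':
--                 tich *= int(s[i])
--                 check = True
--     if check == False:
--         tich = 0
--     return tong, tich
-- ===== SOURCE B (Python) =====
-- def solve(s):
--     # Pair-stride walk: consume digits two at a time; collect nonzero odd-index
--     # digits into a list, so the "no odd nonzero digit -> 0" case falls out of
--     # list emptiness instead of a parity test plus a check flag.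
--     tong = 0
--     odds = []
--     i = 0
--     n = len(s)
--     while i < n:
--         tong += int(s[i])
--         if i + 1 < n and s[i + 1] != '0':
--             odds.append(int(s[i + 1]))
--         i += 2
--     tich = 1
--     for d in odds:
--         tich *= d
--     return tong, tich if odds else 0
-- ===== Notes on version B (the rewrite author's own statement) =====
-- stated objective: alternative
-- what changed: B walks the string two characters per step (pair stride) collecting nonzero odd-index digits into a list, deriving the zero-product case from list emptiness, instead of A's per-index parity branch with a running product and a check flag.
import Mathlib
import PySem

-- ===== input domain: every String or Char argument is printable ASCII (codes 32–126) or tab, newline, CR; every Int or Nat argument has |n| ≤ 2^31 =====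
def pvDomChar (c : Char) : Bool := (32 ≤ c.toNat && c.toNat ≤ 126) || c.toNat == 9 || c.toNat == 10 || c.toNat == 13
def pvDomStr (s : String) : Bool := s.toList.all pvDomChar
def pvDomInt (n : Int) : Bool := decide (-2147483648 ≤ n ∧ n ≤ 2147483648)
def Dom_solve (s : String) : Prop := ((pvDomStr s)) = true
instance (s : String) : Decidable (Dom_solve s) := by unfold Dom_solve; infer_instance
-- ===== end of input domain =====

-- B is a pair-stride rewrite (two characters per step, odd nonzero digits collected
-- into a list, zero-product case from list emptiness); same cost, different structure.

-- shared primitive: int(c) for a single character (0 is never used under Pre_solve)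
def pyDigit (c : Char) : Int := (PySem.Int.ofChars? [c]).getD 0

-- ===== PORT A =====
def solve (s : String) : Int × Int :=
  let st := (PySem.List.enumerate s.toList 0).foldl
    (fun (acc : Int × Int × Bool) (p : Int × Char) =>
      if PySem.Int.mod p.1 2 == 0 then (acc.1 + pyDigit p.2, acc.2.1, acc.2.2)
      else if p.2 != '0' then (acc.1, acc.2.1 * pyDigit p.2, true)
      else acc)
    ((0 : Int), (1 : Int), false)
  (st.1, if st.2.2 == false then 0 else st.2.1)

-- ===== PORT B =====
-- the while loop of Source B: step two characters at a time, accumulating tong and odds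
def loopB : List Char → Int → List Int → Int × List Int
  | [], tong, odds => (tong, odds)
  | [c], tong, odds => (tong + pyDigit c, odds)
  | c :: d :: t, tong, odds =>
      loopB t (tong + pyDigit c) (if d != '0' then odds ++ [pyDigit d] else odds)

def solve_alt (s : String) : Int × Int :=
  let r := loopB s.toList 0 []
  let tich := r.2.foldl (· * ·) 1
  (r.1, if r.2.isEmpty then 0 else tich)

-- ===== PRECONDITION & SPEC =====
-- Pre_: A raises ValueError (int(c)) on any non-digit character
def Pre_solve (s : String) : Prop :=
  (s.toList.all (fun c => 48 ≤ c.toNat && c.toNat ≤ 57)) = true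
instance (s : String) : Decidable (Pre_solve s) := by unfold Pre_solve; infer_instance
def pvWitness_solve : String := "102439"

def Spec_solve (s : String) (out : Int × Int) : Prop := out = solve_alt s
instance (s : String) (out : Int × Int) : Decidable (Spec_solve s out) := by unfold Spec_solve; infer_instance

-- ===== CLAIM (what is proved, stated in full; the proofs are below) =====
def Claim_equal_solve : Prop := ∀ (s : String), Dom_solve s → Pre_solve s → Spec_solve s (solve s)

-- ===== LEMMAS AND PROOFS =====

theorem loopB_invariant (t : List Char) (m : Nat) (tong : Int) (odds : List Int) :
    (PySem.List.enumerate t (2 * (m : Int))).foldl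
      (fun (acc : Int × Int × Bool) (p : Int × Char) =>
        if PySem.Int.mod p.1 2 == 0 then (acc.1 + pyDigit p.2, acc.2.1, acc.2.2)
        else if p.2 != '0' then (acc.1, acc.2.1 * pyDigit p.2, true)
        else acc)
      (tong, odds.foldl (· * ·) 1, !odds.isEmpty)
    = ((loopB t tong odds).1, (loopB t tong odds).2.foldl (· * ·) 1,
       !(loopB t tong odds).2.isEmpty) := by
  induction t, tong, odds using loopB.induct generalizing m with
  | case1 tong odds => simp [PySem.List.enumerate, loopB]
  | case2 c tong odds =>
      simp [PySem.List.enumerate, loopB]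
  | case3 c d t tong odds ih =>
      have h0 : PySem.Int.mod (2 * (m : Int)) 2 = 0 := by
        rw [PySem.Int.mod_eq_emod_of_pos (by norm_num : (0:Int) < 2)]; omega
      have h1 : PySem.Int.mod (2 * (m : Int) + 1) 2 = 1 := by
        rw [PySem.Int.mod_eq_emod_of_pos (by norm_num : (0:Int) < 2)]; omega
      rw [PySem.List.enumerate_cons, PySem.List.enumerate_cons]
      simp only [List.foldl_cons, h0, h1]
      have harg : (2 * (m : Int) + 1 + 1) = 2 * ((m + 1 : Nat) : Int) := by push_cast; ring
      rw [harg]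
      by_cases hd : d = '0'
      · simpa [hd, loopB] using ih (m + 1)
      · have hne : (odds ++ [pyDigit d]).isEmpty = false := by simp
        simpa [hd, loopB, List.foldl_append, hne] using ih (m + 1)

-- ===== VERDICT (by name: the statement is the Claim_ definition above) =====
theorem solve_spec : Claim_equal_solve := by
  intro s _ _
  unfold Spec_solve
  simp only [solve, solve_alt]
  have h := loopB_invariant s.toList 0 0 []
  simp only [Nat.cast_zero, mul_zero, List.foldl_nil, List.isEmpty_nil, Bool.not_true] at h
  rw [h]
  rcases hE : (loopB s.toList 0 []).2.isEmpty with _ | _ <;> simp
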